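-- pv_equiv track=rewrite | github.com/HYERIN0718/Programming | Programmers/level0/A로_B_만들기.py | solution
-- ===== SOURCE A (Python) =====
-- def solution(before, after):
--     answer = 0
--     before_list = list(map(str, str(before)))
--     after_list = list(map(str, str(after)))
--     arr = []
--
--     for i in range(len(before_list)):
--         if before_list[i] in after_list:
--             after_list.remove(before_list[i])
--
--     if len(arr) == len(after_list):
--         answer = 1
--     else:
--         answer = 0
--     return answer
-- ===== SOURCE B (Python) =====
-- def solution(before, after):
--     b = sorted(str(before))
--     a = sorted(str(after))
--     i = 0
--     j = 0
--     while j < len(a):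
--         if i >= len(b):
--             return 0
--         if b[i] == a[j]:
--             i += 1
--             j += 1
--         elif b[i] < a[j]:
--             i += 1
--         else:
--             return 0
--     return 1
-- ===== Notes on version B (the rewrite author's own statement) =====
-- stated objective: faster
-- what changed: Replaces A's greedy loop that destructively removes each before-character from a copy of after's list (one O(m) remove scan per before-character) with sorting both character lists and checking multiset inclusion in a single two-pointer merge pass.
import Mathlib
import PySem

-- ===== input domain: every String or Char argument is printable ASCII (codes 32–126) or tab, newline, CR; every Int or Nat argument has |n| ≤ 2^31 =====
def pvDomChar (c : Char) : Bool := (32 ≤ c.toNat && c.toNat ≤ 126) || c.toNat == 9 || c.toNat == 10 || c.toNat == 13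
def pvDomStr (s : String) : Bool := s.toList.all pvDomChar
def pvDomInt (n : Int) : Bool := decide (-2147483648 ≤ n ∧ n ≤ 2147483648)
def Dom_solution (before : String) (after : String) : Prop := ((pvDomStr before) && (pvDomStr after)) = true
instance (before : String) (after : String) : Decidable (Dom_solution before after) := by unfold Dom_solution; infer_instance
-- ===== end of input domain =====

-- B sorts both character lists and checks multiset inclusion in one two-pointer merge pass instead of A's remove-one-by-one scanning; measured faster in a timing run.


-- ===== PORT A =====
-- list(map(str, str(before))) builds 1-character strings; equality/membership/remove on
-- such strings coincide with Char equality, so the lists are ported as List Char (exact).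
-- 'arr' is always [], so the final test 'len(arr) == len(after_list)' is 'length = 0'.
def solution (before : String) (after : String) : Int :=
  let before_list := before.toList
  let after_list :=
    before_list.foldl (fun al c => if c ∈ al then al.erase c else al) after.toList
  if after_list.length = 0 then 1 else 0

-- ===== PORT B =====
-- Source B's while loop with indices i (over sorted b) and j (over sorted a), ported as
-- recursion on the two suffixes b[i:], a[j:] (each step drops heads exactly as the
-- indices advance; the early 'return 0' branches are the literal 0 results).
def mergeConsume : List Char → List Char → Int
  | _, [] => 1
  | [], _ :: _ => 0
  | x :: bs, y :: as => if x = y then mergeConsume bs as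
                        else if x < y then mergeConsume bs (y :: as)
                        else 0

def solution_alt (before : String) (after : String) : Int :=
  mergeConsume (PySem.List.sorted before.toList (fun c => c) false)
               (PySem.List.sorted after.toList (fun c => c) false)

-- ===== PRECONDITION & SPEC =====
def Spec_solution (before : String) (after : String) (out : Int) : Prop := out = solution_alt before after
instance (before : String) (after : String) (out : Int) : Decidable (Spec_solution before after out) := by unfold Spec_solution; infer_instance

-- ===== CLAIM (what is proved, stated in full; the proofs are below) =====
def Claim_equal_solution : Prop := ∀ (before : String) (after : String), Dom_solution before after → Spec_solution before after (solution before after)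

-- ===== LEMMAS AND PROOFS =====

-- Unconditional count-of-cons unfolding (if-form), omega-friendly.
theorem pv_cnt (c x : Char) (l : List Char) :
    (x :: l).count c = l.count c + (if x = c then 1 else 0) := by
  simp [List.count_cons]

-- mergeConsume only returns 0 or 1.
theorem pv_merge_cases (bs as : List Char) : mergeConsume bs as = 1 ∨ mergeConsume bs as = 0 := by
  induction bs generalizing as with
  | nil => cases as <;> simp [mergeConsume]
  | cons x bs ih =>
      cases as with
      | nil => simp [mergeConsume]
      | cons y as =>
          simp only [mergeConsume]
          split_ifs with h1 h2
          · exact ih as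
          · exact ih (y :: as)
          · right; rfl

-- On sorted lists, the merge pass decides multiset inclusion (count-wise).
theorem pv_merge_iff (bs : List Char) : ∀ as : List Char,
    bs.Pairwise (· ≤ ·) → as.Pairwise (· ≤ ·) →
    (mergeConsume bs as = 1 ↔ ∀ c, as.count c ≤ bs.count c) := by
  induction bs with
  | nil =>
      intro as _ _
      cases as with
      | nil => simp [mergeConsume]
      | cons y as =>
          simp only [mergeConsume]
          constructor
          · intro h; exact absurd h (by decide)
          · intro h
            have hy := h y
            rw [pv_cnt] at hy
            simp at hy
  | cons x bs ih =>
      intro as hb ha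
      have hb' : bs.Pairwise (· ≤ ·) := (List.pairwise_cons.mp hb).2
      have hxall : ∀ z ∈ bs, x ≤ z := (List.pairwise_cons.mp hb).1
      cases as with
      | nil => simp [mergeConsume]
      | cons y as =>
          have ha' : as.Pairwise (· ≤ ·) := (List.pairwise_cons.mp ha).2
          have hyall : ∀ z ∈ as, y ≤ z := (List.pairwise_cons.mp ha).1
          simp only [mergeConsume]
          split_ifs with h1 h2
          · -- x = y : drop both heads
            subst h1
            rw [ih as hb' ha']
            constructor
            · intro h c
              have hcc := h c
              rw [pv_cnt, pv_cnt]
              split_ifs <;> omega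
            · intro h c
              have hcc := h c
              rw [pv_cnt, pv_cnt] at hcc
              split_ifs at hcc <;> omega
          · -- x < y : x cannot occur in y :: as, drop x
            rw [ih (y :: as) hb' ha]
            constructor
            · intro h c
              have hcc := h c
              have hx := pv_cnt c x bs
              split_ifs at hx <;> omega
            · intro h c
              have hc := h c
              by_cases hcx : c = x
              · subst hcx
                have hc0 : (y :: as).count c = 0 := by
                  apply List.count_eq_zero.mpr
                  intro hmem
                  rcases List.mem_cons.mp hmem with h' | h'
                  · exact absurd h' (ne_of_lt h2)
                  · exact absurd (hyall c h') (not_le_of_gt h2)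
                simp [hc0]
              · have hxc : ¬ x = c := fun h' => hcx h'.symm
                have hx := pv_cnt c x bs
                rw [if_neg hxc] at hx
                omega
          · -- x > y : y occurs in y :: as but not in x :: bs
            constructor
            · intro h; exact absurd h (by decide)
            · intro h
              have hy := h y
              have hyx : y < x := lt_of_le_of_ne (le_of_not_gt h2) (fun h => h1 h.symm)
              have h0 : (x :: bs).count y = 0 := by
                apply List.count_eq_zero.mpr
                intro hmem
                rcases List.mem_cons.mp hmem with h' | h'
                · exact h1 h'.symm
                · exact absurd (hxall y h') (not_le_of_gt hyx)
              rw [pv_cnt, h0] at hy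
              simp at hy

-- One step of A's loop decrements the count of the removed character (Nat-truncated).
theorem pv_count_step (al : List Char) (x c : Char) :
    ((if x ∈ al then al.erase x else al).count c) = al.count c - (if x = c then 1 else 0) := by
  by_cases hx : x ∈ al
  · simp only [hx, if_true, List.count_erase]
    by_cases hxc : x = c
    · subst hxc; simp
    · simp [hxc]
  · simp only [hx, if_false]
    by_cases hxc : x = c
    · subst hxc
      have : al.count x = 0 := List.count_eq_zero.mpr hx
      simp [this]
    · simp [hxc]

-- Invariant of A's whole loop: counts of the residual list.
theorem pv_count_fold (bl : List Char) : ∀ (al : List Char) (c : Char),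
    ((bl.foldl (fun al c => if c ∈ al then al.erase c else al) al).count c)
      = al.count c - bl.count c := by
  induction bl with
  | nil => intro al c; simp
  | cons x bl ih =>
      intro al c
      simp only [List.foldl_cons]
      rw [ih, pv_count_step, List.count_cons]
      by_cases hxc : x = c
      · subst hxc; simp; omega
      · simp [hxc]

-- ===== VERDICT (by name: the statement is the Claim_ definition above) =====
theorem solution_spec : Claim_equal_solution := by
  intro before after _
  unfold Spec_solution solution solution_alt
  have hbp : (PySem.List.sorted before.toList (fun c => c) false).Pairwise (· ≤ ·) :=
    PySem.List.sorted_pairwise _ _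
  have hap : (PySem.List.sorted after.toList (fun c => c) false).Pairwise (· ≤ ·) :=
    PySem.List.sorted_pairwise _ _
  have hbperm := PySem.List.sorted_perm before.toList (fun c : Char => c) false
  have haperm := PySem.List.sorted_perm after.toList (fun c : Char => c) false
  have hiff := pv_merge_iff _ _ hbp hap
  have hcnt : (∀ c, (PySem.List.sorted after.toList (fun c => c) false).count c
        ≤ (PySem.List.sorted before.toList (fun c => c) false).count c)
      ↔ ∀ c : Char, after.toList.count c ≤ before.toList.count c := by
    constructor <;> intro h c <;>
      simpa [hbperm.count_eq, haperm.count_eq] using h c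
  have key : (before.toList.foldl (fun al c => if c ∈ al then al.erase c else al) after.toList).length = 0
      ↔ ∀ c : Char, after.toList.count c ≤ before.toList.count c := by
    rw [List.length_eq_zero_iff, List.eq_nil_iff_forall_not_mem]
    constructor
    · intro h c
      have := pv_count_fold before.toList after.toList c
      by_contra hlt
      have : c ∈ (before.toList.foldl (fun al c => if c ∈ al then al.erase c else al) after.toList) := by
        rw [← List.count_pos_iff]; omega
      exact h c this
    · intro h c hc
      have hcount := pv_count_fold before.toList after.toList c
      have hpos : 0 < (before.toList.foldl (fun al c => if c ∈ al then al.erase c else al) after.toList).count c :=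
        List.count_pos_iff.mpr hc
      have := h c
      omega
  by_cases hA : (before.toList.foldl (fun al c => if c ∈ al then al.erase c else al) after.toList).length = 0
  · rw [if_pos hA]
    exact ((hiff.trans hcnt).mpr (key.mp hA)).symm
  · rw [if_neg hA]
    rcases pv_merge_cases (PySem.List.sorted before.toList (fun c => c) false)
        (PySem.List.sorted after.toList (fun c => c) false) with h1 | h0
    · exact absurd (key.mpr ((hiff.trans hcnt).mp h1)) hA
    · exact h0.symm
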